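-- pv_equiv track=rewrite | github.com/blackopsrepl/zoyd | zoyd/loop/prompt_builder.py | _extract_recent_iterations
-- ===== SOURCE A (Python) =====
-- def _extract_recent_iterations(progress_content: str, n: int) -> str:
--     """Extract the last N iterations from progress content.
--
--     Splits the progress content on ``## Iteration`` headers and returns the
--     last *n* iteration sections joined together.  Any preamble text before the
--     first ``## Iteration`` header is excluded.
--
--     Args:
--         progress_content: Full progress file content.
--         n: Number of recent iterations to return.
--
--     Returns:
--         The last *n* iteration sections as a single string, or an empty string
--         if there are no iterations.
--     """
--     if not progress_content:
--         return ""
--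
--     parts = progress_content.split("\n## Iteration ")
--     # parts[0] is the preamble (before the first header), remaining are iterations
--     # Each iteration part (after the first) needs the header prefix restored
--     iterations = [f"## Iteration {part}" for part in parts[1:]]
--
--     if not iterations:
--         return ""
--
--     return "\n".join(iterations[-n:])
-- ===== SOURCE B (Python) =====
-- def _extract_recent_iterations(progress_content: str, n: int) -> str:
--     """Return the last n iteration sections as one substring of the input.
--
--     Instead of splitting, re-prefixing and re-joining, locate every
--     '\n## Iteration ' delimiter and slice the original string once from
--     just after the newline of the n-th-from-last delimiter.
--     """
--     delim = "\n## Iteration "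
--     positions = []
--     start = 0
--     while True:
--         pos = progress_content.find(delim, start)
--         if pos == -1:
--             break
--         positions.append(pos)
--         start = pos + len(delim)
--     selected = positions[-n:]
--     if not selected:
--         return ""
--     return progress_content[selected[0] + 1:]
-- ===== Notes on version B (the rewrite author's own statement) =====
-- stated objective: alternative
-- what changed: B scans for the byte positions of every '\n## Iteration ' delimiter with a find loop and returns a single slice of the original string starting just after the n-th-from-last delimiter's newline, instead of A's split / re-prefix / re-join of section lists.
import Mathlib
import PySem

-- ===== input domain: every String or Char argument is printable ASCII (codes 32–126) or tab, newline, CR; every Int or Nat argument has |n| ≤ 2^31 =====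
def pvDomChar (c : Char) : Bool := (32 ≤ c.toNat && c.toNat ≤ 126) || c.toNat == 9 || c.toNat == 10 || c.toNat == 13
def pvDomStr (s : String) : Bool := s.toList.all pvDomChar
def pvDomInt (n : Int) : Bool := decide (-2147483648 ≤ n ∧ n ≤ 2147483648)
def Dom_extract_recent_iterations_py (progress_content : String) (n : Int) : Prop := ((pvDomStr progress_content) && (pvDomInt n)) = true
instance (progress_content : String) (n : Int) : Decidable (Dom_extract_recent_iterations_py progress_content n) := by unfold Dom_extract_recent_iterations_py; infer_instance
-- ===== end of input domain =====

-- B replaces A's split / re-prefix / re-join by a find loop over the delimiter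
-- positions followed by one slice of the original string (objective: alternative).

-- ===== PORT A =====
-- the two string literals of the Python source, as character lists
def pvSep : List Char := "\n## Iteration ".toList
def pvHdr : List Char := "## Iteration ".toList

-- literal port of A: s.split(sep) with nonempty sep is PySem.Chars.splitOn;
-- f"## Iteration {part}" is pvHdr ++ part; iterations[-n:] is slice (some (-n)) none
def extract_recent_iterations_py (progress_content : String) (n : Int) : String :=
  if progress_content.toList = [] then ""
  else
    let parts := PySem.Chars.splitOn progress_content.toList pvSep
    let iterations := (parts.drop 1).map (fun part => pvHdr ++ part)
    if iterations = [] then ""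
    else String.ofList (PySem.Chars.join "\n".toList (PySem.List.slice iterations (some (-n)) none))

-- ===== PORT B =====
-- termination fact for the find loop: a successful find lies at or after `start`
-- and the whole delimiter fits before the end of the string
theorem pvFindFrom_bounds (cs : List Char) (start : Nat)
    (h : PySem.Chars.findFrom cs pvSep (start : Int) none ≠ -1) :
    start < (PySem.Chars.findFrom cs pvSep (start : Int) none).toNat + pvSep.length ∧
    (PySem.Chars.findFrom cs pvSep (start : Int) none).toNat + pvSep.length ≤ cs.length := by
  by_cases hk : start ≤ cs.length
  · have hspec := PySem.Chars.findFrom_natCast_spec cs pvSep start hk h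
    obtain ⟨h1, h2, -⟩ := hspec
    have hlen := h2.length_le
    have hdl : (List.drop (PySem.Chars.findFrom cs pvSep (↑start) none).toNat cs).length
        = cs.length - (PySem.Chars.findFrom cs pvSep (↑start) none).toNat := by
      simp
    have hpos : (0 : Int) ≤ PySem.Chars.findFrom cs pvSep (↑start) none := by
      exact le_trans (by exact_mod_cast Nat.zero_le start) h1
    have h1' : start ≤ (PySem.Chars.findFrom cs pvSep (↑start) none).toNat := by
      omega
    have hsep : pvSep.length = 14 := by decide
    omega
  · exfalso
    apply h
    have hlt : (cs.length : Int) < (start : Int) := by exact_mod_cast Nat.lt_of_not_le hk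
    simp only [PySem.Chars.findFrom]
    split_ifs <;> omega

-- literal port of Source B's while loop: pos = s.find(delim, start); stop on -1,
-- else record pos and continue from pos + len(delim)
def pvFindPositions (cs : List Char) (start : Nat) : List Int :=
  let pos := PySem.Chars.findFrom cs pvSep (start : Int) none
  if h : pos = -1 then []
  else pos :: pvFindPositions cs (pos.toNat + pvSep.length)
termination_by cs.length + 1 - start
decreasing_by
  have := pvFindFrom_bounds cs start h
  omega

def extract_recent_iterations_py_alt (progress_content : String) (n : Int) : String :=
  let positions := pvFindPositions progress_content.toList 0
  let selected := PySem.List.slice positions (some (-n)) none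
  match selected with
  | [] => ""
  | p :: _ => PySem.Str.slice progress_content (some (p + 1)) none

-- ===== PRECONDITION & SPEC =====
def Spec_extract_recent_iterations_py (progress_content : String) (n : Int) (out : String) : Prop := out = extract_recent_iterations_py_alt progress_content n
instance (progress_content : String) (n : Int) (out : String) : Decidable (Spec_extract_recent_iterations_py progress_content n out) := by unfold Spec_extract_recent_iterations_py; infer_instance

-- ===== CLAIM (what is proved, stated in full; the proofs are below) =====
def Claim_equal_extract_recent_iterations_py : Prop := ∀ (progress_content : String) (n : Int), Dom_extract_recent_iterations_py progress_content n → Spec_extract_recent_iterations_py progress_content n (extract_recent_iterations_py progress_content n)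


-- ===== LEMMAS AND PROOFS =====

-- pvSep is the newline followed by the header prefix
theorem pvSep_eq : pvSep = '\n' :: pvHdr := by decide

theorem pvSep_len : pvSep.length = 14 := by decide

-- reference splitter: recurse on the first occurrence of pvSep
def splitRec (t : List Char) : List (List Char) :=
  let p := PySem.Chars.find t pvSep
  if _h : p = -1 then [t]
  else t.take p.toNat :: splitRec (t.drop (p.toNat + pvSep.length))
termination_by t.length
decreasing_by
  have hp : (0:Int) ≤ PySem.Chars.find t pvSep := by
    have := PySem.Chars.neg_one_le_find t pvSep
    omega
  have hinf : pvSep <:+: t := (PySem.Chars.find_nonneg_iff t pvSep).mp hp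
  have := hinf.length_le
  have hsep : pvSep.length = 14 := by decide
  simp only [List.length_drop]
  omega

-- reference position list: relative first-occurrence positions of pvSep
def posRec (t : List Char) : List Nat :=
  let p := PySem.Chars.find t pvSep
  if _h : p = -1 then []
  else p.toNat :: (posRec (t.drop (p.toNat + pvSep.length))).map (· + (p.toNat + pvSep.length))
termination_by t.length
decreasing_by
  have hp : (0:Int) ≤ PySem.Chars.find t pvSep := by
    have := PySem.Chars.neg_one_le_find t pvSep
    omega
  have hinf : pvSep <:+: t := (PySem.Chars.find_nonneg_iff t pvSep).mp hp
  have := hinf.length_le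
  have hsep : pvSep.length = 14 := by decide
  simp only [List.length_drop]
  omega

theorem splitRec_neg {t : List Char} (h : PySem.Chars.find t pvSep = -1) :
    splitRec t = [t] := by
  rw [splitRec]
  simp [h]

theorem splitRec_pos {t : List Char} (h : PySem.Chars.find t pvSep ≠ -1) :
    splitRec t = t.take (PySem.Chars.find t pvSep).toNat
      :: splitRec (t.drop ((PySem.Chars.find t pvSep).toNat + pvSep.length)) := by
  rw [splitRec]
  simp [h]

theorem posRec_neg {t : List Char} (h : PySem.Chars.find t pvSep = -1) :
    posRec t = [] := by
  rw [posRec]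
  simp [h]

theorem posRec_pos {t : List Char} (h : PySem.Chars.find t pvSep ≠ -1) :
    posRec t = (PySem.Chars.find t pvSep).toNat
      :: (posRec (t.drop ((PySem.Chars.find t pvSep).toNat + pvSep.length))).map
           (· + ((PySem.Chars.find t pvSep).toNat + pvSep.length)) := by
  rw [posRec]
  simp [h]

theorem splitRec_ne_nil (t : List Char) : splitRec t ≠ [] := by
  rw [splitRec]
  split <;> simp

theorem find_nonneg_of_ne {t : List Char} (h : PySem.Chars.find t pvSep ≠ -1) :
    (0:Int) ≤ PySem.Chars.find t pvSep := by
  have := PySem.Chars.neg_one_le_find t pvSep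
  omega

-- a found position decomposes the string: t = take p ++ pvSep ++ drop (p+14)
theorem find_decomp {t : List Char} (h : PySem.Chars.find t pvSep ≠ -1) :
    t = t.take (PySem.Chars.find t pvSep).toNat ++ pvSep
          ++ t.drop ((PySem.Chars.find t pvSep).toNat + pvSep.length)
      ∧ (PySem.Chars.find t pvSep).toNat + pvSep.length ≤ t.length := by
  have hp := find_nonneg_of_ne h
  obtain ⟨hpre, -⟩ := PySem.Chars.find_spec hp
  set p := (PySem.Chars.find t pvSep).toNat with hpdef
  obtain ⟨r, hr⟩ := hpre
  have hlen : p + pvSep.length ≤ t.length := by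
    have := congrArg List.length hr
    simp at this
    have hple : p ≤ t.length := by
      by_contra hgt
      rw [List.drop_eq_nil_of_le (by omega)] at hr
      have := congrArg List.length hr
      simp at this
      have : pvSep.length = 0 := by omega
      rw [pvSep_len] at this
      omega
    omega
  constructor
  · conv_lhs => rw [← List.take_append_drop p t]
    rw [← hr]
    have : t.drop (p + pvSep.length) = r := by
      rw [← List.drop_drop, ← hr]
      simp
    rw [this, List.append_assoc]
  · exact hlen

-- uniqueness: a position that is an occurrence with none before it is the find
theorem find_eq_nat (t sub : List Char) (j : Nat) (h1 : sub <+: t.drop j)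
    (h2 : ∀ i < j, ¬ sub <+: t.drop i) : PySem.Chars.find t sub = j := by
  obtain ⟨r, hr⟩ := h1
  have hinf : sub <:+: t := by
    refine ⟨t.take j, r, ?_⟩
    rw [List.append_assoc, hr, List.take_append_drop]
  have hp : (0:Int) ≤ PySem.Chars.find t sub := (PySem.Chars.find_nonneg_iff t sub).mpr hinf
  obtain ⟨hpre, hmin⟩ := PySem.Chars.find_spec hp
  have : (PySem.Chars.find t sub).toNat = j := by
    by_contra hne
    rcases Nat.lt_or_ge (PySem.Chars.find t sub).toNat j with hlt | hge
    · exact h2 _ hlt hpre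
    · have hlt : j < (PySem.Chars.find t sub).toNat := by omega
      exact hmin j hlt ⟨r, hr⟩
  omega

-- find on a cons that does not start with the pattern
theorem find_cons {c : Char} {rest : List Char}
    (h : ¬ pvSep <+: (c :: rest)) :
    PySem.Chars.find (c :: rest) pvSep =
      if PySem.Chars.find rest pvSep = -1 then -1 else PySem.Chars.find rest pvSep + 1 := by
  split
  case isTrue hneg =>
    rw [PySem.Chars.find_eq_neg_one_iff] at hneg ⊢
    intro hinf
    rcases List.infix_cons_iff.mp hinf with hp | hi
    · exact h hp
    · exact hneg hi
  case isFalse hne =>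
    have hp := PySem.Chars.neg_one_le_find rest pvSep
    have hp0 : (0:Int) ≤ PySem.Chars.find rest pvSep := by omega
    obtain ⟨hpre, hmin⟩ := PySem.Chars.find_spec hp0
    set j := (PySem.Chars.find rest pvSep).toNat with hj
    have : PySem.Chars.find (c :: rest) pvSep = (j + 1 : Nat) := by
      apply find_eq_nat
      · simpa using hpre
      · intro i hi
        cases i with
        | zero => simpa using h
        | succ i' =>
          have : i' < j := by omega
          simpa using hmin i' this
    omega

def mapHead (pre : List Char) : List (List Char) → List (List Char)
  | [] => [pre]
  | h :: t => (pre ++ h) :: t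

theorem mapHead_nil {l : List (List Char)} (h : l ≠ []) : mapHead [] l = l := by
  cases l with
  | nil => exact absurd rfl h
  | cons a t => simp [mapHead]

-- the worker of splitOn computes splitRec (with the pending chunk prefixed)
theorem go_spec : ∀ (fuel : Nat) (l cur acc : _), l.length < fuel →
    PySem.Chars.splitOn.go pvSep fuel l cur acc
      = acc.reverse ++ mapHead cur.reverse (splitRec l) := by
  intro fuel
  induction fuel with
  | zero => intro l cur acc h; omega
  | succ f ih =>
    intro l cur acc h
    cases l with
    | nil =>
      have hfind : PySem.Chars.find [] pvSep = -1 := by decide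
      rw [splitRec_neg hfind]
      simp [PySem.Chars.splitOn.go, mapHead]
    | cons c rest =>
      rw [PySem.Chars.splitOn.go]
      by_cases hpre : pvSep.isPrefixOf (c :: rest) = true
      · rw [if_pos hpre]
        have hfind : PySem.Chars.find (c :: rest) pvSep = 0 := by
          apply find_eq_nat _ _ 0
          · simpa using List.isPrefixOf_iff_prefix.mp hpre
          · intro i hi; omega
        rw [splitRec_pos (by rw [hfind]; decide)]
        rw [hfind]
        have hlen : (List.drop pvSep.length (c :: rest)).length < f := by
          simp at h ⊢
          have := pvSep_len
          omega
        rw [ih _ _ _ hlen]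
        simp only [List.reverse_nil]
        rw [mapHead_nil (splitRec_ne_nil _)]
        simp [mapHead]
      · rw [if_neg hpre]
        have hnp : ¬ pvSep <+: (c :: rest) := fun hp => hpre (List.isPrefixOf_iff_prefix.mpr hp)
        have hlen : rest.length < f := by simp at h; omega
        rw [ih _ _ _ hlen]
        have hc := find_cons hnp
        by_cases hr : PySem.Chars.find rest pvSep = -1
        · rw [if_pos hr] at hc
          rw [splitRec_neg hr, splitRec_neg hc]
          simp [mapHead]
        · rw [if_neg hr] at hc
          have hrpos := find_nonneg_of_ne hr
          have hcne : PySem.Chars.find (c :: rest) pvSep ≠ -1 := by rw [hc]; omega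
          rw [splitRec_pos hr, splitRec_pos hcne]
          rw [hc]
          have htn : (PySem.Chars.find rest pvSep + 1).toNat
              = (PySem.Chars.find rest pvSep).toNat + 1 := by omega
          rw [htn]
          have hd : List.drop ((PySem.Chars.find rest pvSep).toNat + 1 + pvSep.length) (c :: rest)
              = List.drop ((PySem.Chars.find rest pvSep).toNat + pvSep.length) rest := by
            rw [show (PySem.Chars.find rest pvSep).toNat + 1 + pvSep.length
                = ((PySem.Chars.find rest pvSep).toNat + pvSep.length) + 1 from by omega,
              List.drop_succ_cons]
          rw [hd]
          simp [mapHead, List.take_succ_cons]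

theorem splitOn_eq_splitRec (cs : List Char) :
    PySem.Chars.splitOn cs pvSep = splitRec cs := by
  unfold PySem.Chars.splitOn
  rw [go_spec (cs.length + 1) cs [] [] (by omega)]
  simp [mapHead_nil (splitRec_ne_nil _)]

-- joining the re-prefixed parts of t yields pvHdr ++ t
theorem join_splitRec : ∀ t : List Char,
    PySem.Chars.join ['\n'] ((splitRec t).map (fun part => pvHdr ++ part)) = pvHdr ++ t := by
  intro t
  induction t using splitRec.induct with
  | case1 t p hp =>
    rw [splitRec_neg hp]
    simp [PySem.Chars.join_singleton]
  | case2 t p hp ih =>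
    rw [splitRec_pos hp]
    obtain ⟨hdec, hle⟩ := find_decomp hp
    cases hu : splitRec (t.drop ((PySem.Chars.find t pvSep).toNat + pvSep.length)) with
    | nil => exact absurd hu (splitRec_ne_nil _)
    | cons a r =>
      simp only [List.map_cons]
      rw [PySem.Chars.join_cons_cons]
      have hjoin : PySem.Chars.join ['\n'] ((pvHdr ++ a) :: List.map (fun part => pvHdr ++ part) r)
          = pvHdr ++ List.drop ((PySem.Chars.find t pvSep).toNat + pvSep.length) t := by
        rw [show ((pvHdr ++ a) :: List.map (fun part => pvHdr ++ part) r)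
            = List.map (fun part => pvHdr ++ part) (a :: r) from rfl, ← hu]
        exact ih
      rw [hjoin]
      conv_rhs => rw [hdec]
      rw [pvSep_eq]
      simp
-- suffix joins of the iteration parts
def sufJoin : List (List Char) → List (List Char)
  | [] => []
  | h :: r => PySem.Chars.join ['\n'] ((h :: r).map (fun part => pvHdr ++ part)) :: sufJoin r

theorem sufJoin_length (l : List (List Char)) : (sufJoin l).length = l.length := by
  induction l with
  | nil => rfl
  | cons h r ih => simp [sufJoin, ih]

theorem sufJoin_getElem (l : List (List Char)) (i : Nat) (hi : i < (sufJoin l).length) :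
    (sufJoin l)[i] = PySem.Chars.join ['\n'] ((l.drop i).map (fun part => pvHdr ++ part)) := by
  induction l generalizing i with
  | nil => simp [sufJoin] at hi
  | cons h r ih =>
    cases i with
    | zero => simp [sufJoin]
    | succ i' =>
      simp only [sufJoin, List.getElem_cons_succ, List.drop_succ_cons]
      exact ih i' (by simp [sufJoin] at hi; simpa [sufJoin_length] using hi)

-- correspondence: position p yields exactly the suffix join starting at that part
theorem posRec_main : ∀ t : List Char,
    (posRec t).map (fun q => t.drop (q + 1)) = sufJoin (splitRec t).tail := by
  intro t
  induction t using posRec.induct with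
  | case1 t p hp =>
    rw [posRec_neg hp, splitRec_neg hp]
    simp [sufJoin]
  | case2 t p hp ih =>
    rw [posRec_pos hp, splitRec_pos hp]
    obtain ⟨hdec, hle⟩ := find_decomp hp
    set j := (PySem.Chars.find t pvSep).toNat with hj
    set u := t.drop (j + pvSep.length) with hu
    simp only [List.map_cons, List.map_map, List.tail_cons]
    have hdrop1 : t.drop (j + 1) = pvHdr ++ u := by
      have hlt : (t.take j ++ ['\n']).length = j + 1 := by
        simp only [List.length_append, List.length_take, List.length_cons, List.length_nil]
        have := pvSep_len
        omega
      conv_lhs => rw [hdec, pvSep_eq]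
      rw [show t.take j ++ ('\n' :: pvHdr) ++ u = (t.take j ++ ['\n']) ++ (pvHdr ++ u) by simp]
      rw [List.drop_left' hlt]
    have hcomp : ((fun q => t.drop (q + 1)) ∘ (· + (j + pvSep.length)))
        = fun q => u.drop (q + 1) := by
      funext q
      simp only [Function.comp_apply, hu, List.drop_drop]
      congr 1
      omega
    rw [hcomp, ih]
    cases hv : splitRec u with
    | nil => exact absurd hv (splitRec_ne_nil _)
    | cons a r =>
      have hjoin : PySem.Chars.join ['\n'] ((a :: r).map (fun part => pvHdr ++ part))
          = pvHdr ++ u := by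
        rw [← hv, join_splitRec]
      simp only [sufJoin, List.tail_cons]
      rw [hdrop1, hjoin]

-- the port loop equals posRec on the remaining suffix, shifted by the start index
theorem pvFindPositions_neg {cs : List Char} {k : Nat}
    (h : PySem.Chars.findFrom cs pvSep (k : Int) none = -1) :
    pvFindPositions cs k = [] := by
  rw [pvFindPositions]
  simp [h]

theorem pvFindPositions_pos {cs : List Char} {k : Nat}
    (h : PySem.Chars.findFrom cs pvSep (k : Int) none ≠ -1) :
    pvFindPositions cs k = PySem.Chars.findFrom cs pvSep (k : Int) none
      :: pvFindPositions cs ((PySem.Chars.findFrom cs pvSep (k : Int) none).toNat + pvSep.length) := by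
  rw [pvFindPositions]
  simp [h]

theorem pvFindPositions_eq : ∀ (cs : List Char) (k : Nat), k ≤ cs.length →
    pvFindPositions cs k = (posRec (cs.drop k)).map (fun q => ((k + q : Nat) : Int)) := by
  intro cs
  suffices h : ∀ (m k : Nat), cs.length - k ≤ m → k ≤ cs.length →
      pvFindPositions cs k = (posRec (cs.drop k)).map (fun q => ((k + q : Nat) : Int)) by
    intro k hk
    exact h (cs.length - k) k le_rfl hk
  intro m
  induction m with
  | zero =>
    intro k hm hk
    have hkeq : k = cs.length := by omega
    have hdropnil : cs.drop k = [] := by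
      rw [hkeq]
      simp
    have hf : PySem.Chars.find (cs.drop k) pvSep = -1 := by
      rw [hdropnil]
      decide
    have hpos' : PySem.Chars.findFrom cs pvSep (k : Int) none = -1 := by
      rw [PySem.Chars.findFrom_natCast cs pvSep k hk, if_pos hf]
    rw [pvFindPositions_neg hpos', posRec_neg hf]
    simp
  | succ m ihm =>
    intro k hm hk
    by_cases hpos' : PySem.Chars.findFrom cs pvSep (k : Int) none = -1
    · rw [pvFindPositions_neg hpos']
      rw [PySem.Chars.findFrom_natCast cs pvSep k hk] at hpos'
      by_cases hf : PySem.Chars.find (cs.drop k) pvSep = -1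
      · rw [posRec_neg hf]
        simp
      · rw [if_neg hf] at hpos'
        have := find_nonneg_of_ne hf
        omega
    · rw [pvFindPositions_pos hpos']
      set pos := PySem.Chars.findFrom cs pvSep (k : Int) none with hposdef
      have hposval := PySem.Chars.findFrom_natCast cs pvSep k hk
      rw [← hposdef] at hposval
      have hf : PySem.Chars.find (cs.drop k) pvSep ≠ -1 := by
        intro hf
        rw [hf, if_pos rfl] at hposval
        exact hpos' hposval
      rw [if_neg hf] at hposval
      have hfn := find_nonneg_of_ne hf
      set j := (PySem.Chars.find (cs.drop k) pvSep).toNat with hjdef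
      obtain ⟨-, hle⟩ := find_decomp hf
      have hdl : (cs.drop k).length = cs.length - k := by simp
      have htn : pos.toNat = k + j := by omega
      have hsep14 : pvSep.length = 14 := by decide
      have hk2 : pos.toNat + pvSep.length ≤ cs.length := by omega
      have ih' := ihm (pos.toNat + pvSep.length) (by omega) hk2
      rw [ih']
      rw [posRec_pos hf]
      simp only [List.map_cons, List.map_map]
      have hdd : (cs.drop k).drop (j + pvSep.length) = cs.drop (pos.toNat + pvSep.length) := by
        rw [List.drop_drop]
        congr 1
        omega
      rw [hdd]
      congr 1
      · rw [hposval]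
        push_cast
        omega
      · apply List.map_congr_left
        intro q hq
        simp only [Function.comp_apply]
        congr 1
        omega

-- slicing with only a (possibly negative) start index is a drop
theorem slice_some_none {α : Type} (xs : List α) (m : Int) :
    PySem.List.slice xs (some m) none = xs.drop (PySem.List.clampIdx xs.length m) := by
  simp only [PySem.List.slice]
  apply List.take_of_length_le
  simp


-- ===== VERDICT (by name: the statement is the Claim_ definition above) =====
theorem extract_recent_iterations_py_spec : Claim_equal_extract_recent_iterations_py := by
  unfold Claim_equal_extract_recent_iterations_py
  intro pc n _hdom
  unfold Spec_extract_recent_iterations_py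
  simp only [extract_recent_iterations_py, extract_recent_iterations_py_alt]
  have hnl : "\n".toList = ['\n'] := by decide
  rw [hnl]
  have hpos0 : pvFindPositions pc.toList 0 = (posRec pc.toList).map (fun (q : Nat) => (q : Int)) := by
    rw [pvFindPositions_eq pc.toList 0 (Nat.zero_le _), List.drop_zero]
    apply List.map_congr_left
    intro q hq
    congr 1
    omega
  rw [hpos0]
  by_cases hnil : pc.toList = []
  · rw [if_pos hnil]
    have hpr : posRec pc.toList = [] := by
      rw [hnil, posRec_neg (by decide)]
    rw [hpr]
    rw [show (([] : List Nat).map (fun (q : Nat) => (q : Int))) = [] from rfl]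
    rw [slice_some_none]
    simp
  · rw [if_neg hnil]
    rw [splitOn_eq_splitRec]
    obtain ⟨h0, t, hsplit⟩ : ∃ h0 t, splitRec pc.toList = h0 :: t := by
      cases hs : splitRec pc.toList with
      | nil => exact absurd hs (splitRec_ne_nil _)
      | cons a b => exact ⟨a, b, rfl⟩
    rw [hsplit]
    simp only [List.drop_one, List.tail_cons]
    have hlen : (posRec pc.toList).length = t.length := by
      have hc := congrArg List.length (posRec_main pc.toList)
      simpa [sufJoin_length, hsplit] using hc
    rw [slice_some_none, slice_some_none]
    simp only [List.length_map, hlen]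
    set i0 := PySem.List.clampIdx t.length (-n) with hi0
    by_cases hcase : i0 < t.length
    · have hidxP : i0 < (posRec pc.toList).length := by omega
      have hidx : i0 < ((posRec pc.toList).map (fun (q : Nat) => (q : Int))).length := by
        simpa using hidxP
      rw [List.drop_eq_getElem_cons hidx]
      simp only [List.getElem_map]
      have hingt : t ≠ [] := by
        intro h
        rw [h] at hcase
        simp at hcase
      rw [if_neg (by simp [hingt] : ¬ (t.map (fun part => pvHdr ++ part)) = [])]
      have hq : pc.toList.drop ((posRec pc.toList)[i0]'hidxP + 1)
          = PySem.Chars.join ['\n'] ((t.drop i0).map (fun part => pvHdr ++ part)) := by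
        have hmain := posRec_main pc.toList
        have hidx2 : i0 < ((posRec pc.toList).map (fun q => pc.toList.drop (q + 1))).length := by
          simpa using hidxP
        have hmain2 : (posRec pc.toList).map (fun q => pc.toList.drop (q + 1)) = sufJoin t := by
          rw [hmain, hsplit, List.tail_cons]
        have hget := List.getElem_of_eq hmain2 hidx2
        simp only [List.getElem_map] at hget
        rw [sufJoin_getElem t i0 (by rw [sufJoin_length]; exact hcase)] at hget
        exact hget
      have hB : PySem.Str.slice pc (some ((((posRec pc.toList)[i0]'hidxP : Nat) : Int) + 1)) none
          = String.ofList (pc.toList.drop ((posRec pc.toList)[i0]'hidxP + 1)) := by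
        simp only [PySem.Str.slice, PySem.Chars.slice_eq_listSlice]
        rw [show ((((posRec pc.toList)[i0]'hidxP : Nat) : Int) + 1)
            = (((((posRec pc.toList)[i0]'hidxP + 1 : Nat)) : Int)) from by push_cast; ring]
        rw [PySem.List.slice_from pc.toList (Int.natCast_nonneg _)]
        simp
      rw [hB, hq]
      rw [List.map_drop]
    · have hge : t.length ≤ i0 := Nat.le_of_not_lt hcase
      have hdropB : ((posRec pc.toList).map (fun (q : Nat) => (q : Int))).drop i0 = [] := by
        apply List.drop_eq_nil_of_le
        simpa [hlen] using hge
      rw [hdropB]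
      by_cases hit : (t.map (fun part => pvHdr ++ part)) = []
      · rw [if_pos hit]
      · rw [if_neg hit]
        have hdropA : (t.map (fun part => pvHdr ++ part)).drop i0 = [] := by
          apply List.drop_eq_nil_of_le
          simpa using hge
        rw [hdropA]
        simp [PySem.Chars.join_nil]
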